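-- pv_equiv track=rewrite | github.com/AuroraGiggleFairy/AuroraGiggleFairy.github.io | SCRIPT-Main.py | build_pack_definitions
-- ===== SOURCE A (Python) =====
-- from typing import Dict, List, Optional, Tuple
--
-- def build_pack_definitions(all_folders: List[str]) -> List[Tuple[str, List[str], Optional[Dict[str, List[str]]]]]:
--     backpackplus_mods = [f for f in all_folders if f.startswith("AGF-BackpackPlus-")]
--     hudplus_mods = [f for f in all_folders if f.startswith("AGF-HUDPlus-")]
--     hudpluszother_mods = [f for f in all_folders if f.startswith("AGF-HUDPluszOther-")]
--     noeac_mods = [f for f in all_folders if f.startswith("AGF-NoEAC-")]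
--     modders_mods = [f for f in all_folders if f.startswith("AGF-4Modders-")]
--     vp_mods = [f for f in all_folders if f.startswith("AGF-VP-")]
--     special_mods = [f for f in all_folders if f.startswith("zzzAGF-Special")]
--
--     backpackplus_84 = next((f for f in backpackplus_mods if "84Slots" in f), None)
--
--     packs: List[Tuple[str, List[str], Optional[Dict[str, List[str]]]]] = []
--     packs.append(("00_BackpackPlus_All", backpackplus_mods, None))
--
--     giggle_root = hudplus_mods + vp_mods + special_mods + ([backpackplus_84] if backpackplus_84 else [])
--     giggle_optionals = {
--         ".Optionals-BackpackPlus": backpackplus_mods,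
--         ".Optionals-HUDPlus": hudplus_mods + hudpluszother_mods,
--         ".Optionals-NoEAC": noeac_mods,
--         ".Optionals-4Modders": modders_mods,
--     }
--     packs.append(("00_GigglePack_All", giggle_root, giggle_optionals))
--
--     hudplus_all_root = hudplus_mods + special_mods
--     hudplus_all_optionals = {
--         ".Optionals-NoEAC": noeac_mods,
--         ".Optionals-HUDPluszOther": hudpluszother_mods,
--     }
--     packs.append(("00_HUDPlus_All", hudplus_all_root, hudplus_all_optionals))
--     packs.append(("00_HUDPluszOther_All", hudpluszother_mods, None))
--     packs.append(("00_NoEAC_All", noeac_mods, None))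
--     packs.append(("00_4Modders_All", modders_mods, None))
--
--     vp_all_root = vp_mods + special_mods
--     vp_all_optionals = {".Optionals-NoEAC": noeac_mods}
--     packs.append(("00_VP_All", vp_all_root, vp_all_optionals))
--
--     return packs
-- ===== SOURCE B (Python) =====
-- from typing import Dict, List, Optional, Tuple
--
-- def _sift(folders: List[str], prefix: str) -> Tuple[List[str], List[str]]:
--     """Partition folders into (hits, rest) by a startswith test, preserving order."""
--     hits: List[str] = []
--     rest: List[str] = []
--     for f in folders:
--         (hits if f.startswith(prefix) else rest).append(f)
--     return hits, rest
--
-- def build_pack_definitions(all_folders: List[str]) -> List[Tuple[str, List[str], Optional[Dict[str, List[str]]]]]: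
--     # Sequentially sift a shrinking remainder: each stage removes its bucket from the
--     # pool before the next stage scans it. Correct because the seven prefixes are
--     # mutually exclusive (none is a prefix of another), so removing earlier hits
--     # never changes a later bucket, and sifting preserves relative order.
--     backpackplus, rest = _sift(all_folders, "AGF-BackpackPlus-")
--     hudplus, rest = _sift(rest, "AGF-HUDPlus-")
--     hudpluszother, rest = _sift(rest, "AGF-HUDPluszOther-")
--     noeac, rest = _sift(rest, "AGF-NoEAC-")
--     modders, rest = _sift(rest, "AGF-4Modders-")
--     vp, rest = _sift(rest, "AGF-VP-")
--     special, _ = _sift(rest, "zzzAGF-Special")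
--
--     backpackplus_84 = next((f for f in backpackplus if "84Slots" in f), None)
--     tail84 = [backpackplus_84] if backpackplus_84 is not None else []
--
--     return [
--         ("00_BackpackPlus_All", backpackplus, None),
--         ("00_GigglePack_All", hudplus + vp + special + tail84, {
--             ".Optionals-BackpackPlus": backpackplus,
--             ".Optionals-HUDPlus": hudplus + hudpluszother,
--             ".Optionals-NoEAC": noeac,
--             ".Optionals-4Modders": modders,
--         }),
--         ("00_HUDPlus_All", hudplus + special, {
--             ".Optionals-NoEAC": noeac,
--             ".Optionals-HUDPluszOther": hudpluszother,
--         }),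
--         ("00_HUDPluszOther_All", hudpluszother, None),
--         ("00_NoEAC_All", noeac, None),
--         ("00_4Modders_All", modders, None),
--         ("00_VP_All", vp + special, {".Optionals-NoEAC": noeac}),
--     ]
-- ===== Notes on version B (the rewrite author's own statement) =====
-- stated objective: alternative
-- what changed: Instead of seven independent full-list comprehensions, B sequentially partitions a shrinking remainder with a reusable sift helper (each stage removes its bucket from the pool before the next stage scans it), relying on the mutual exclusivity of the prefixes for correctness.
import Mathlib
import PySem

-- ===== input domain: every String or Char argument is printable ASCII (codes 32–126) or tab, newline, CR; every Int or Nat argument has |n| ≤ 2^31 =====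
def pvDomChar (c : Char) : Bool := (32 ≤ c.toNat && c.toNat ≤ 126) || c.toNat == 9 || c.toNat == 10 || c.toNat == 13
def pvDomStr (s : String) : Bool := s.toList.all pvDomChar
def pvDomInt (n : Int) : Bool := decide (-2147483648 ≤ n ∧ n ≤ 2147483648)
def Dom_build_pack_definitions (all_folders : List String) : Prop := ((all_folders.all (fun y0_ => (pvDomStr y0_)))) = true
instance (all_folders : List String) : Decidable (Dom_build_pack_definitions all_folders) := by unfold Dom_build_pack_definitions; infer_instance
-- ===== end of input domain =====

-- B replaces seven independent full-list comprehensions with sequential sifting of a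
-- shrinking remainder (a reusable partition helper), correct because the prefixes are
-- mutually exclusive; objective: alternative decomposition, same cost.


-- ===== PORT A =====
def build_pack_definitions (all_folders : List String) : List (String × List String × (Option (List (String × List String)))) :=
  let backpackplus_mods := all_folders.filter (fun f => PySem.Str.startswith f "AGF-BackpackPlus-")
  let hudplus_mods := all_folders.filter (fun f => PySem.Str.startswith f "AGF-HUDPlus-")
  let hudpluszother_mods := all_folders.filter (fun f => PySem.Str.startswith f "AGF-HUDPluszOther-")
  let noeac_mods := all_folders.filter (fun f => PySem.Str.startswith f "AGF-NoEAC-")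
  let modders_mods := all_folders.filter (fun f => PySem.Str.startswith f "AGF-4Modders-")
  let vp_mods := all_folders.filter (fun f => PySem.Str.startswith f "AGF-VP-")
  let special_mods := all_folders.filter (fun f => PySem.Str.startswith f "zzzAGF-Special")
  let backpackplus_84 := backpackplus_mods.find? (fun f => PySem.Str.isIn "84Slots" f)
  -- 'if backpackplus_84' is Python truthiness: false for None and for the empty string
  let giggle_root := hudplus_mods ++ vp_mods ++ special_mods ++
    (match backpackplus_84 with
      | some f => if f.toList = [] then [] else [f]
      | none => [])
  let giggle_optionals : List (String × List String) :=
    [(".Optionals-BackpackPlus", backpackplus_mods),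
     (".Optionals-HUDPlus", hudplus_mods ++ hudpluszother_mods),
     (".Optionals-NoEAC", noeac_mods),
     (".Optionals-4Modders", modders_mods)]
  let hudplus_all_optionals : List (String × List String) :=
    [(".Optionals-NoEAC", noeac_mods),
     (".Optionals-HUDPluszOther", hudpluszother_mods)]
  [("00_BackpackPlus_All", backpackplus_mods, none),
   ("00_GigglePack_All", giggle_root, some giggle_optionals),
   ("00_HUDPlus_All", hudplus_mods ++ special_mods, some hudplus_all_optionals),
   ("00_HUDPluszOther_All", hudpluszother_mods, none),
   ("00_NoEAC_All", noeac_mods, none),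
   ("00_4Modders_All", modders_mods, none),
   ("00_VP_All", vp_mods ++ special_mods, some [(".Optionals-NoEAC", noeac_mods)])]

-- ===== PORT B =====
-- _sift: one ordered partition pass, appending each folder to hits or rest
def bpdSift (folders : List String) (pre : String) : List String × List String :=
  folders.foldl
    (fun acc f =>
      if PySem.Str.startswith f pre then (acc.1 ++ [f], acc.2) else (acc.1, acc.2 ++ [f]))
    ([], [])

def build_pack_definitions_alt (all_folders : List String) : List (String × List String × (Option (List (String × List String)))) :=
  let s1 := bpdSift all_folders "AGF-BackpackPlus-"
  let backpackplus := s1.1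
  let s2 := bpdSift s1.2 "AGF-HUDPlus-"
  let hudplus := s2.1
  let s3 := bpdSift s2.2 "AGF-HUDPluszOther-"
  let hudpluszother := s3.1
  let s4 := bpdSift s3.2 "AGF-NoEAC-"
  let noeac := s4.1
  let s5 := bpdSift s4.2 "AGF-4Modders-"
  let modders := s5.1
  let s6 := bpdSift s5.2 "AGF-VP-"
  let vp := s6.1
  let special := (bpdSift s6.2 "zzzAGF-Special").1
  let backpackplus_84 := backpackplus.find? (fun f => PySem.Str.isIn "84Slots" f)
  let tail84 := match backpackplus_84 with
    | some f => [f]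
    | none => []
  [("00_BackpackPlus_All", backpackplus, none),
   ("00_GigglePack_All", hudplus ++ vp ++ special ++ tail84,
    some [(".Optionals-BackpackPlus", backpackplus),
          (".Optionals-HUDPlus", hudplus ++ hudpluszother),
          (".Optionals-NoEAC", noeac),
          (".Optionals-4Modders", modders)]),
   ("00_HUDPlus_All", hudplus ++ special,
    some [(".Optionals-NoEAC", noeac),
          (".Optionals-HUDPluszOther", hudpluszother)]),
   ("00_HUDPluszOther_All", hudpluszother, none),
   ("00_NoEAC_All", noeac, none),
   ("00_4Modders_All", modders, none),
   ("00_VP_All", vp ++ special, some [(".Optionals-NoEAC", noeac)])]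

-- ===== PRECONDITION & SPEC =====
def Spec_build_pack_definitions (all_folders : List String) (out : List (String × List String × (Option (List (String × List String))))) : Prop := out = build_pack_definitions_alt all_folders
instance (all_folders : List String) (out : List (String × List String × (Option (List (String × List String))))) : Decidable (Spec_build_pack_definitions all_folders out) := by unfold Spec_build_pack_definitions; infer_instance

-- ===== CLAIM (what is proved, stated in full; the proofs are below) =====
def Claim_equal_build_pack_definitions : Prop := ∀ (all_folders : List String), Dom_build_pack_definitions all_folders → Spec_build_pack_definitions all_folders (build_pack_definitions all_folders)

-- ===== LEMMAS AND PROOFS =====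

-- the sift fold is a pair of filters (appending inside the accumulator vs in front)
theorem bpdSift_foldl (pre : String) (xs : List String) (h r : List String) :
    xs.foldl
      (fun acc f =>
        if PySem.Str.startswith f pre then (acc.1 ++ [f], acc.2) else (acc.1, acc.2 ++ [f]))
      (h, r) =
    (h ++ xs.filter (fun f => PySem.Str.startswith f pre),
     r ++ xs.filter (fun f => !PySem.Str.startswith f pre)) := by
  induction xs generalizing h r with
  | nil => simp
  | cons x xs ih =>
    simp only [List.foldl_cons, List.filter_cons]
    by_cases hx : PySem.Str.startswith x pre = true
    · rw [if_pos hx, ih]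
      rw [PySem.Str.startswith_eq] at hx
      simp [hx]
    · rw [if_neg hx, ih]
      rw [PySem.Str.startswith_eq] at hx
      simp [hx]

theorem bpdSift_eq (pre : String) (xs : List String) :
    bpdSift xs pre =
      (xs.filter (fun f => PySem.Str.startswith f pre),
       xs.filter (fun f => !PySem.Str.startswith f pre)) := by
  unfold bpdSift
  simpa using bpdSift_foldl pre xs [] []

-- filtering a filtered list: the inner filter is invisible when q implies r
theorem filter_sift {q r : String → Bool} (h : ∀ f, q f = true → r f = true)
    (xs : List String) : (xs.filter r).filter q = xs.filter q := by
  induction xs with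
  | nil => rfl
  | cons x xs ih =>
    by_cases hq : q x = true
    · simp [h x hq, hq, ih]
    · by_cases hr : r x = true <;> simp [hq, hr, ih]

-- mutual exclusivity: two incomparable prefixes cannot both start the same string
theorem sw_excl (q r : String) (h1 : ¬ r.toList <+: q.toList) (h2 : ¬ q.toList <+: r.toList)
    (f : String) (hq : PySem.Str.startswith f q = true) :
    (!PySem.Str.startswith f r) = true := by
  rw [Bool.not_eq_eq_eq_not, Bool.not_true]
  by_contra hr
  rw [Bool.not_eq_false] at hr
  rw [PySem.Str.startswith_eq, PySem.Chars.startswith_iff] at hq hr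
  rcases List.prefix_or_prefix_of_prefix hq hr with h | h
  · exact h2 h
  · exact h1 h

-- any folder the BackpackPlus filter keeps is nonempty (nonempty prefix)
theorem nonempty_of_startswith (f : String)
    (hf : PySem.Str.startswith f "AGF-BackpackPlus-" = true) : f.toList ≠ [] := by
  rw [PySem.Str.startswith_eq, PySem.Chars.startswith_iff] at hf
  intro hnil
  rw [hnil] at hf
  have := hf.length_le
  simp at this

-- ===== VERDICT (by name: the statement is the Claim_ definition above) =====
theorem build_pack_definitions_spec : Claim_equal_build_pack_definitions := by
  intro all_folders _
  unfold Spec_build_pack_definitions build_pack_definitions build_pack_definitions_alt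
  simp only [bpdSift_eq]
  rw [filter_sift (sw_excl _ _ (by decide) (by decide)),
      filter_sift (sw_excl _ _ (by decide) (by decide)),
      filter_sift (sw_excl _ _ (by decide) (by decide)),
      filter_sift (sw_excl _ _ (by decide) (by decide)),
      filter_sift (sw_excl _ _ (by decide) (by decide)),
      filter_sift (sw_excl _ _ (by decide) (by decide)),
      filter_sift (sw_excl _ _ (by decide) (by decide)),
      filter_sift (sw_excl _ _ (by decide) (by decide)),
      filter_sift (sw_excl _ _ (by decide) (by decide)),
      filter_sift (sw_excl _ _ (by decide) (by decide)),
      filter_sift (sw_excl _ _ (by decide) (by decide)),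
      filter_sift (sw_excl _ _ (by decide) (by decide)),
      filter_sift (sw_excl _ _ (by decide) (by decide)),
      filter_sift (sw_excl _ _ (by decide) (by decide)),
      filter_sift (sw_excl _ _ (by decide) (by decide)),
      filter_sift (sw_excl _ _ (by decide) (by decide)),
      filter_sift (sw_excl _ _ (by decide) (by decide)),
      filter_sift (sw_excl _ _ (by decide) (by decide)),
      filter_sift (sw_excl _ _ (by decide) (by decide)),
      filter_sift (sw_excl _ _ (by decide) (by decide)),
      filter_sift (sw_excl _ _ (by decide) (by decide))]
  cases hfind : (all_folders.filter (fun f => PySem.Str.startswith f "AGF-BackpackPlus-")).find?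
      (fun f => PySem.Str.isIn "84Slots" f) with
  | none => simp
  | some f =>
    have hmem := List.mem_of_find?_eq_some hfind
    have hsw : PySem.Str.startswith f "AGF-BackpackPlus-" = true := (List.mem_filter.1 hmem).2
    have hne := nonempty_of_startswith f hsw
    simp [hne]
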